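-- pv_equiv track=rewrite | github.com/sidharthvaitha/vaitha2cs440 | mp1/part1.2.py | calculate_startchar
-- ===== SOURCE A (Python) =====
-- def calculate_startchar(fruitsinit):
-- 	n = len(fruitsinit)
-- 	startMark = '0'
-- 	for i in range(n):
-- 		if(startMark == '9'):
-- 			startMark = 'a'
-- 		elif(startMark == 'z'):
-- 			startMark = 'A'
-- 		else:
-- 			startMark = chr(ord(startMark) + 1)
-- 	return chr(ord(startMark) + 1)
-- ===== SOURCE B (Python) =====
-- def calculate_startchar(fruitsinit):
--     n = len(fruitsinit)
--     if n <= 9: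
--         code = 48 + n            # '0'..'9' segment
--     elif n <= 35:
--         code = 87 + n            # 'a'..'z' segment (97 + (n-10))
--     else:
--         code = 65 + (n - 36) % 58  # from 'A' the machine cycles with period 58
--     return chr(code + 1)
-- ===== Notes on version B (the rewrite author's own statement) =====
-- stated objective: faster
-- what changed: Replaces the n-step character-transition loop with O(1) closed-form segment arithmetic (digit segment, lowercase segment, then the period-58 cycle starting at 'A').
import Mathlib
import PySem

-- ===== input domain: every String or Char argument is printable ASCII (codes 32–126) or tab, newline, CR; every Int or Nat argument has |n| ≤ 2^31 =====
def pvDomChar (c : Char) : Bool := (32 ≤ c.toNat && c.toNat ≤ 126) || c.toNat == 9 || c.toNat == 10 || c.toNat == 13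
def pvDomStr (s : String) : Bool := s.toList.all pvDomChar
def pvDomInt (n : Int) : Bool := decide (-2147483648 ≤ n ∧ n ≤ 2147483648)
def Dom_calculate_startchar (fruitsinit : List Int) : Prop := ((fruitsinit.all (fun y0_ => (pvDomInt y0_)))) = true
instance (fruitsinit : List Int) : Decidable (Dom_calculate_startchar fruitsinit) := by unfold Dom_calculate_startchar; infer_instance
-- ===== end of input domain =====

-- B: closed-form O(1) segment arithmetic instead of A's n-step transition loop (faster).
-- ===== PORT A =====
def pvStepA (c : Char) : Char :=
  if c = '9' then 'a'
  else if c = 'z' then 'A'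
  else Char.ofNat (c.toNat + 1)

def calculate_startchar (fruitsinit : List Int) : String :=
  let n := fruitsinit.length
  let startMark := (List.range n).foldl (fun c _ => pvStepA c) '0'
  (Char.ofNat (startMark.toNat + 1)).toString

-- ===== PORT B =====
def calculate_startchar_alt (fruitsinit : List Int) : String :=
  let n := fruitsinit.length
  let code : Nat :=
    if n ≤ 9 then 48 + n
    else if n ≤ 35 then 87 + n
    else 65 + (n - 36) % 58
  (Char.ofNat (code + 1)).toString

-- ===== PRECONDITION & SPEC =====
def Spec_calculate_startchar (fruitsinit : List Int) (out : String) : Prop := out = calculate_startchar_alt fruitsinit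
instance (fruitsinit : List Int) (out : String) : Decidable (Spec_calculate_startchar fruitsinit out) := by unfold Spec_calculate_startchar; infer_instance

-- ===== CLAIM (what is proved, stated in full; the proofs are below) =====
def Claim_equal_calculate_startchar : Prop := ∀ (fruitsinit : List Int), Dom_calculate_startchar fruitsinit → Spec_calculate_startchar fruitsinit (calculate_startchar fruitsinit)

-- ===== LEMMAS AND PROOFS =====



-- code of the machine state after n steps (matches B's closed form)
def pvCodeAfter (n : Nat) : Nat :=
  if n ≤ 9 then 48 + n
  else if n ≤ 35 then 87 + n
  else 65 + (n - 36) % 58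

theorem pvCodeAfter_bounds (n : Nat) : 48 ≤ pvCodeAfter n ∧ pvCodeAfter n ≤ 122 := by
  unfold pvCodeAfter
  split_ifs <;> omega

theorem pvStepA_ofNat (k : Nat) (h1 : 48 ≤ k) (h2 : k ≤ 122) :
    pvStepA (Char.ofNat k) =
      if k = 57 then 'a' else if k = 122 then 'A' else Char.ofNat (k + 1) := by
  interval_cases k <;> decide

theorem pvFoldA (n : Nat) :
    (List.range n).foldl (fun c _ => pvStepA c) '0' = Char.ofNat (pvCodeAfter n) := by
  induction n with
  | zero => decide
  | succ n ih =>
    rw [List.range_succ, List.foldl_append, ih, List.foldl_cons, List.foldl_nil]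
    obtain ⟨h1, h2⟩ := pvCodeAfter_bounds n
    rw [pvStepA_ofNat _ h1 h2]
    have ha : 'a' = Char.ofNat 97 := rfl
    have hA : 'A' = Char.ofNat 65 := rfl
    rw [ha, hA]
    unfold pvCodeAfter
    split_ifs <;> exact congrArg Char.ofNat (by omega)

theorem pvToNat_ofNat (k : Nat) (h : k < 128) : (Char.ofNat k).toNat = k := by
  have hv : k.isValidChar := Or.inl (by omega)
  rw [Char.ofNat, dif_pos hv]
  show (UInt32.ofNatLT k _).toNat = k
  exact UInt32.toNat_ofNatLT

-- ===== VERDICT =====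
theorem calculate_startchar_spec : Claim_equal_calculate_startchar := by
  intro l _
  unfold Spec_calculate_startchar calculate_startchar calculate_startchar_alt
  dsimp only
  rw [pvFoldA, pvToNat_ofNat _ (by obtain ⟨_, h⟩ := pvCodeAfter_bounds l.length; omega)]
  rfl
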